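-- pv_equiv track=rewrite | github.com/kamilGie/ASRT-WDI | Kolokwia/Kolokwium_3/2023_3B/Rozwiązania/main.py | check
-- ===== SOURCE A (Python) =====
-- def check(s):  # 0 - rosnący, 1 - bez porządku, 2 - malejący
--     l = len(s)
--     if l == 1 or s[0] == s[1]:
--         return 1  # edge cases: napis 1-literowy lub niemonotoniczny na początku
--     lock = True if ord(s[0]) < ord(s[1]) else False
--     for i in range(l - 1):
--         if lock and s[i + 1] <= s[i]:
--             return 1
--         if not lock and s[i + 1] >= s[i]:
--             return 1
--     # dotarliśmy do końca bez zmiany monotoniczności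
--     if lock:
--         return 0  # rosnący
--     return 2  # malejący
-- ===== SOURCE B (Python) =====
-- def check(s):
--     if len(s) <= 1:
--         return 1
--     if all(a < b for a, b in zip(s, s[1:])):
--         return 0
--     if all(b < a for a, b in zip(s, s[1:])):
--         return 2
--     return 1
-- ===== Notes on version B (the rewrite author's own statement) =====
-- stated objective: simpler
-- what changed: Replaced A's single stateful early-return index pass with a direction flag by two declarative strict-monotonicity scans of adjacent character pairs (zip of s with its tail), selecting 0/2/1 from the two booleans.
import Mathlib
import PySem

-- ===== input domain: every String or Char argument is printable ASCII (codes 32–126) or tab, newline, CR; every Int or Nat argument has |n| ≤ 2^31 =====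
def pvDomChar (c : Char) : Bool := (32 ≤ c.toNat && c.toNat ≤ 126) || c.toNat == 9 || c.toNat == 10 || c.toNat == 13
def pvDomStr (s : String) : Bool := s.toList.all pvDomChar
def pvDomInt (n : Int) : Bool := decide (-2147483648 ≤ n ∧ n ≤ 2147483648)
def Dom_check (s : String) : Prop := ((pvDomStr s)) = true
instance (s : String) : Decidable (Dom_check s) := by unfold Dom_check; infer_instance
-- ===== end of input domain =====

-- B replaces A's stateful flag-and-early-return index scan by two declarative strict-monotonicity
-- scans over adjacent pairs (simpler decomposition); no side effects in either version.

-- ===== PORT A =====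
-- the for-loop of A: iterate over the index list, early `return 1` = `some 1`
def checkLoop (cs : List Char) (lock : Bool) : List Int → Option Int
  | [] => none
  | i :: rest =>
    match PySem.List.pyGet? cs (i + 1), PySem.List.pyGet? cs i with
    | some b, some a =>
      if lock && decide (b ≤ a) then some 1
      else if !lock && decide (a ≤ b) then some 1
      else checkLoop cs lock rest
    | _, _ => some 1   -- IndexError inside the loop (unreachable for the indices A uses)

def check (s : String) : Int :=
  if ((s.toList.length : Int) == 1) then 1
  else
    match PySem.List.pyGet? s.toList 0, PySem.List.pyGet? s.toList 1 with
    | some c0, some c1 =>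
      if c0 == c1 then 1
      else
        match checkLoop s.toList (decide (c0 < c1))
            (PySem.List.pyRange 0 ((s.toList.length : Int) - 1) 1) with
        | some r => r
        | none => if c0 < c1 then 0 else 2
    | _, _ => 0   -- s = "": Python raises IndexError here; excluded by Pre_check

-- ===== PORT B =====
def check_alt (s : String) : Int :=
  if s.toList.length ≤ 1 then 1
  else
    if (s.toList.zip s.toList.tail).all (fun p => decide (p.1 < p.2)) then 0
    else if (s.toList.zip s.toList.tail).all (fun p => decide (p.2 < p.1)) then 2
    else 1

-- ===== PRECONDITION & SPEC =====
-- Pre_ excludes exactly the empty string, on which A raises IndexError (s[0]).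
def Pre_check (s : String) : Prop := s ≠ ""
instance (s : String) : Decidable (Pre_check s) := by unfold Pre_check; infer_instance
def pvWitness_check : String := "abc"

def Spec_check (s : String) (out : Int) : Prop := out = check_alt s
instance (s : String) (out : Int) : Decidable (Spec_check s out) := by unfold Spec_check; infer_instance

-- ===== CLAIM =====
def Claim_equal_check : Prop := ∀ (s : String), Dom_check s → Pre_check s → Spec_check s (check s)

-- ===== LEMMAS AND PROOFS =====

-- the zip-of-adjacent-pairs `all` is the pointwise statement over indices
lemma zip_all_iff (f : Char → Char → Prop) [DecidablePred fun p : Char × Char => f p.1 p.2] :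
    ∀ (cs : List Char),
      ((cs.zip cs.tail).all (fun p => decide (f p.1 p.2)) = true ↔
        ∀ i, (h : i + 1 < cs.length) → f cs[i] cs[i + 1])
  | [] => by simp
  | [c] => by simp
  | c1 :: c2 :: rest => by
    have ih := zip_all_iff f (c2 :: rest)
    simp only [List.tail_cons, List.zip_cons_cons, List.all_cons, Bool.and_eq_true,
      decide_eq_true_eq] at *
    constructor
    · rintro ⟨h1, h2⟩ i hi
      match i with
      | 0 => simpa using h1
      | (j + 1) =>
        have := ih.mp h2 j (by simpa using hi)
        simpa using this
    · intro h
      refine ⟨h 0 (by simp), ih.mpr ?_⟩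
      intro j hj
      have := h (j + 1) (by simpa using hj)
      simpa using this

-- A's loop reaches the end (no early `return 1`) iff every visited index is a strict step
lemma checkLoop_none_iff (cs : List Char) (lock : Bool) :
    ∀ (idxs : List Int),
      (checkLoop cs lock idxs = none ↔
        ∀ i ∈ idxs, ∃ a b, PySem.List.pyGet? cs i = some a ∧
          PySem.List.pyGet? cs (i + 1) = some b ∧
          (if lock then a < b else b < a))
  | [] => by simp [checkLoop]
  | i :: rest => by
    have ih := checkLoop_none_iff cs lock rest
    rcases hb : PySem.List.pyGet? cs (i + 1) with _ | b <;>
      rcases ha : PySem.List.pyGet? cs i with _ | a <;>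
      simp only [checkLoop, hb, ha, List.mem_cons]
    · constructor
      · intro h; cases h
      · intro h
        rcases h i (Or.inl rfl) with ⟨a', b', ha', hb', _⟩
        simp [ha] at ha'
    · constructor
      · intro h; cases h
      · intro h
        rcases h i (Or.inl rfl) with ⟨a', b', ha', hb', _⟩
        simp [hb] at hb'
    · constructor
      · intro h; cases h
      · intro h
        rcases h i (Or.inl rfl) with ⟨a', b', ha', hb', _⟩
        simp [ha] at ha'
    · by_cases hl : lock
      · subst hl
        by_cases hba : b ≤ a
        · simp only [hba, decide_true, Bool.and_true, Bool.not_true, Bool.false_and, Bool.false_eq_true, if_true, if_false]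
          constructor
          · intro h; cases h
          · intro h
            rcases (h i (Or.inl rfl)) with ⟨a', b', ha', hb', hcmp⟩
            rw [ha] at ha'; rw [hb] at hb'
            cases ha'; cases hb'
            exact absurd hba (not_le.mpr (by simpa using hcmp))
        · simp only [hba, decide_false, Bool.and_false, Bool.not_true, Bool.false_and, Bool.false_eq_true, if_false, ih]
          constructor
          · intro h j hj
            rcases hj with rfl | hj
            · exact ⟨a, b, ha, hb, by simp [not_le.mp hba]⟩
            · exact h j hj
          · intro h j hj
            exact h j (Or.inr hj)
      · simp only [hl, Bool.false_and, if_false, Bool.not_false] at *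
        by_cases hab : a ≤ b
        · simp only [hab, decide_true, Bool.and_true, Bool.not_false, Bool.true_and, Bool.false_and, Bool.false_eq_true, if_true, if_false]
          constructor
          · intro h; cases h
          · intro h
            rcases (h i (Or.inl rfl)) with ⟨a', b', ha', hb', hcmp⟩
            rw [ha] at ha'; rw [hb] at hb'
            cases ha'; cases hb'
            exact absurd hab (not_le.mpr (by simpa using hcmp))
        · simp only [hab, decide_false, Bool.and_false, Bool.not_false, Bool.true_and, Bool.false_and, Bool.false_eq_true, if_false, ih]
          constructor
          · intro h j hj
            rcases hj with rfl | hj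
            · exact ⟨a, b, ha, hb, by simp [not_le.mp hab]⟩
            · exact h j hj
          · intro h j hj
            exact h j (Or.inr hj)

-- A's loop can only early-return the value 1
lemma checkLoop_some_eq_one (cs : List Char) (lock : Bool) :
    ∀ (idxs : List Int) (r : Int), checkLoop cs lock idxs = some r → r = 1
  | [], r => by simp [checkLoop]
  | i :: rest, r => by
    rcases hb : PySem.List.pyGet? cs (i + 1) with _ | b <;>
      rcases ha : PySem.List.pyGet? cs i with _ | a <;>
      simp only [checkLoop, hb, ha]
    · intro h; cases h; rfl
    · intro h; cases h; rfl
    · intro h; cases h; rfl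
    · split_ifs <;> intro h
      · cases h; rfl
      · cases h; rfl
      · exact checkLoop_some_eq_one cs lock rest r h

-- the loop over range(l-1) = the pointwise statement over Nat indices
lemma checkLoop_range_iff (cs : List Char) (lock : Bool) :
    checkLoop cs lock (PySem.List.pyRange 0 ((cs.length : Int) - 1) 1) = none ↔
      ∀ j : Nat, (h : j + 1 < cs.length) →
        (if lock then cs[j] < cs[j + 1] else cs[j + 1] < cs[j]) := by
  rw [checkLoop_none_iff]
  constructor
  · intro h j hj
    have hmem : (j : Int) ∈ PySem.List.pyRange 0 ((cs.length : Int) - 1) 1 := by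
      rw [PySem.List.mem_pyRange_one]
      constructor
      · exact_mod_cast Int.natCast_nonneg j
      · omega
    rcases h (j : Int) hmem with ⟨a, b, ha, hb, hcmp⟩
    rw [PySem.List.pyGet?_natCast, List.getElem?_eq_getElem (by omega : j < cs.length)] at ha
    have hcast : ((j : Int) + 1) = ((j + 1 : Nat) : Int) := by push_cast; ring
    rw [hcast, PySem.List.pyGet?_natCast, List.getElem?_eq_getElem hj] at hb
    cases ha; cases hb
    exact hcmp
  · intro h i hi
    rw [PySem.List.mem_pyRange_one] at hi
    obtain ⟨hi0, hi1⟩ := hi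
    obtain ⟨j, rfl⟩ := Int.eq_ofNat_of_zero_le hi0
    have hj : j + 1 < cs.length := by omega
    refine ⟨cs[j], cs[j + 1], ?_, ?_, h j hj⟩
    · rw [PySem.List.pyGet?_natCast, List.getElem?_eq_getElem (by omega : j < cs.length)]
    · have hcast : ((j : Int) + 1) = ((j + 1 : Nat) : Int) := by push_cast; ring
      rw [hcast, PySem.List.pyGet?_natCast, List.getElem?_eq_getElem hj]

-- ===== VERDICT =====
theorem check_spec : Claim_equal_check := by
  unfold Claim_equal_check
  intro s _ hpre
  unfold Spec_check check check_alt
  have hne : s.toList ≠ [] := by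
    intro h
    apply hpre
    have h2 : s.toList = ("" : String).toList := by simpa using h
    exact String.toList_inj.mp h2
  generalize hcs : s.toList = cs at *
  match cs, hne with
  | [c], _ => simp
  | c0 :: c1 :: rest, _ =>
    have hlen1 : ¬ ((((c0 :: c1 :: rest).length : Int)) == 1) = true := by
      simp; omega
    have hg0 : PySem.List.pyGet? (c0 :: c1 :: rest) 0 = some c0 :=
      PySem.List.pyGet?_zero_cons c0 (c1 :: rest)
    have hg1 : PySem.List.pyGet? (c0 :: c1 :: rest) 1 = some c1 := by
      rw [show (1 : Int) = ((1 : Nat) : Int) from rfl, PySem.List.pyGet?_natCast]; rfl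
    have hlen2 : ¬ (c0 :: c1 :: rest).length ≤ 1 := by simp
    have hinc := zip_all_iff (fun a b => a < b) (c0 :: c1 :: rest)
    have hdec := zip_all_iff (fun a b => b < a) (c0 :: c1 :: rest)
    rw [if_neg hlen1, hg0, hg1, if_neg hlen2]
    simp only [beq_iff_eq]
    by_cases heq : c0 = c1
    · subst heq
      have hni : ¬ ((c0 :: c0 :: rest).zip (c0 :: c0 :: rest).tail).all
          (fun p => decide (p.1 < p.2)) = true := fun h =>
        absurd (hinc.mp h 0 (by simp)) (by simp)
      have hnd : ¬ ((c0 :: c0 :: rest).zip (c0 :: c0 :: rest).tail).all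
          (fun p => decide (p.2 < p.1)) = true := fun h =>
        absurd (hdec.mp h 0 (by simp)) (by simp)
      rw [if_pos rfl, if_neg hni, if_neg hnd]
    · rw [if_neg heq]
      by_cases hlt : c0 < c1
      · -- lock = true : A scans for a non-increase, B checks the increasing zip
        rw [show decide (c0 < c1) = true from decide_eq_true hlt]
        have hloop := checkLoop_range_iff (c0 :: c1 :: rest) true
        simp only [if_true] at hloop
        have hnd : ¬ ((c0 :: c1 :: rest).zip (c0 :: c1 :: rest).tail).all
            (fun p => decide (p.2 < p.1)) = true := fun h =>
          absurd hlt (not_lt.mpr (le_of_lt (by simpa using hdec.mp h 0 (by simp))))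
        rcases hl : checkLoop (c0 :: c1 :: rest) true
            (PySem.List.pyRange 0 (((c0 :: c1 :: rest).length : Int) - 1) 1) with _ | r
        · have hall : ((c0 :: c1 :: rest).zip (c0 :: c1 :: rest).tail).all
              (fun p => decide (p.1 < p.2)) = true := hinc.mpr (hloop.mp hl)
          rw [if_pos hall]
          simp [hlt]
        · have h1 : r = 1 := checkLoop_some_eq_one _ _ _ _ hl
          subst h1
          have hni : ¬ ((c0 :: c1 :: rest).zip (c0 :: c1 :: rest).tail).all
              (fun p => decide (p.1 < p.2)) = true := fun h =>
            absurd (hloop.mpr (hinc.mp h)) (by rw [hl]; simp)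
          rw [if_neg hni, if_neg hnd]
          try simp
      · -- lock = false : A scans for a non-decrease, B checks the decreasing zip
        have hgt : c1 < c0 := lt_of_le_of_ne (not_lt.mp hlt) (fun h => heq h.symm)
        rw [show decide (c0 < c1) = false from decide_eq_false hlt]
        have hloop := checkLoop_range_iff (c0 :: c1 :: rest) false
        simp only [Bool.false_eq_true, if_false] at hloop
        have hni : ¬ ((c0 :: c1 :: rest).zip (c0 :: c1 :: rest).tail).all
            (fun p => decide (p.1 < p.2)) = true := fun h =>
          absurd hgt (not_lt.mpr (le_of_lt (by simpa using hinc.mp h 0 (by simp))))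
        rcases hl : checkLoop (c0 :: c1 :: rest) false
            (PySem.List.pyRange 0 (((c0 :: c1 :: rest).length : Int) - 1) 1) with _ | r
        · have hall : ((c0 :: c1 :: rest).zip (c0 :: c1 :: rest).tail).all
              (fun p => decide (p.2 < p.1)) = true := hdec.mpr (hloop.mp hl)
          rw [if_neg hni, if_pos hall]
          simp [hlt]
        · have h1 : r = 1 := checkLoop_some_eq_one _ _ _ _ hl
          subst h1
          have hnd : ¬ ((c0 :: c1 :: rest).zip (c0 :: c1 :: rest).tail).all
              (fun p => decide (p.2 < p.1)) = true := fun h =>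
            absurd (hloop.mpr (hdec.mp h)) (by rw [hl]; simp)
          rw [if_neg hni, if_neg hnd]
          try simp
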